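-- pv_equiv track=rewrite | github.com/RemiArata/CodeWars | thanosSort/thanos.py | thanos_sort
-- ===== SOURCE A (Python) =====
-- def thanos_sort(arr):
--     if arr == sorted(arr):
--         return len(arr)
--     else:
--         if len(arr) % 2 == 0:
--             return max(thanos_sort(arr[:len(arr)//2]), thanos_sort(arr[len(arr)//2:]))
--         else:
--             return max(thanos_sort(arr[:(len(arr)//2)+1]), thanos_sort(arr[(len(arr)//2)+1:]))
-- ===== SOURCE B (Python) =====
-- def thanos_sort(arr):
--     # Prefix descent counts: desc[k] = number of adjacent inversions among arr[:k+1].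
--     desc = [0]
--     d = 0
--     for a, b in zip(arr, arr[1:]):
--         d += (a > b)
--         desc.append(d)
--     # Iterative halving over index intervals with an O(1) sortedness test.
--     best = 0
--     stack = [(0, len(arr))]
--     while stack:
--         i, j = stack.pop()
--         length = j - i
--         if length == 0 or desc[j - 1] == desc[i]:
--             if length > best:
--                 best = length
--         else:
--             m = i + length // 2 + length % 2
--             stack.append((m, j))
--             stack.append((i, m))
--     return best
-- ===== Notes on version B (the rewrite author's own statement) =====
-- stated objective: faster
-- what changed: B precomputes prefix descent counts once so each halving step tests sortedness of an index interval in O(1) (instead of sorting and comparing at every recursion node), and drives the halving with an explicit interval stack instead of recursion on list slices.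
import Mathlib
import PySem

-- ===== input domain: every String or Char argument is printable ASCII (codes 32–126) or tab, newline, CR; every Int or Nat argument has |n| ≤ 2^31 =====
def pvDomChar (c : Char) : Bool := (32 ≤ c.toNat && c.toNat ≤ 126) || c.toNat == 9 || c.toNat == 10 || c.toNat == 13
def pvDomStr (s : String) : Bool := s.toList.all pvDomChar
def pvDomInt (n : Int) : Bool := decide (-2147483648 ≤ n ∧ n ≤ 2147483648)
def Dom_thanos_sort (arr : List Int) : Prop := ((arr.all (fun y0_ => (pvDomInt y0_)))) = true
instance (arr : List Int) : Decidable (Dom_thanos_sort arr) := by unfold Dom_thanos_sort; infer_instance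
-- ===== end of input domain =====

-- B replaces A's sort-per-recursion-node check by precomputed prefix descent counts
-- (O(1) sortedness test per interval) and an explicit interval stack; same return value.

-- ===== PORT A =====
-- termination helpers for the port (cited in decreasing_by)
theorem pv_sorted_short (arr : List Int) (h : arr.length ≤ 1) :
    PySem.List.sorted arr (fun x => x) false = arr := by
  apply PySem.List.sorted_eq_self_of_pairwise
  match arr with
  | [] => simp
  | [x] => simp
  | a :: b :: t => simp at h

theorem pv_two_le_of_ne (arr : List Int)
    (h : ¬ arr = PySem.List.sorted arr (fun x => x) false) : 2 ≤ arr.length := by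
  by_contra hc
  exact h (pv_sorted_short arr (by omega)).symm

def thanos_sort (arr : List Int) : Int :=
  if h : arr = PySem.List.sorted arr (fun x => x) false then
    (arr.length : Int)
  else
    if hpar : PySem.Int.mod ((arr.length : Int)) 2 = 0 then
      max (thanos_sort (PySem.List.slice arr none (some (PySem.Int.floordiv ((arr.length : Int)) 2))))
          (thanos_sort (PySem.List.slice arr (some (PySem.Int.floordiv ((arr.length : Int)) 2)) none))
    else
      max (thanos_sort (PySem.List.slice arr none (some (PySem.Int.floordiv ((arr.length : Int)) 2 + 1))))
          (thanos_sort (PySem.List.slice arr (some (PySem.Int.floordiv ((arr.length : Int)) 2 + 1)) none))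
termination_by arr.length
decreasing_by
  all_goals
    have h2 := pv_two_le_of_ne arr h
    have hfd : PySem.Int.floordiv ((arr.length : Int)) 2 = ((arr.length / 2 : Nat) : Int) := by
      exact_mod_cast PySem.Int.floordiv_natCast arr.length 2
  · rw [hfd, PySem.List.slice_to_natCast]
    simp only [List.length_take]
    omega
  · rw [hfd, PySem.List.slice_from_natCast]
    simp only [List.length_drop]
    omega
  · rw [hfd, show ((arr.length / 2 : Nat) : Int) + 1 = ((arr.length / 2 + 1 : Nat) : Int) by push_cast; ring,
        PySem.List.slice_to_natCast]
    simp only [List.length_take]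
    have hm : PySem.Int.mod ((arr.length : Int)) 2 = ((arr.length % 2 : Nat) : Int) := by
      exact_mod_cast PySem.Int.mod_natCast arr.length 2
    rw [hm] at hpar
    have hodd : arr.length % 2 = 1 := by omega
    omega
  · rw [hfd, show ((arr.length / 2 : Nat) : Int) + 1 = ((arr.length / 2 + 1 : Nat) : Int) by push_cast; ring,
        PySem.List.slice_from_natCast]
    simp only [List.length_drop]
    omega

-- ===== PORT B =====
-- the `for a, b in zip(arr, arr[1:])` loop accumulating the running descent count
def pvDescFrom : Int → List Int → Nat → List Nat
  | _, [], _ => []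
  | a, b :: xs, d =>
      let d' := d + (if a > b then 1 else 0)
      d' :: pvDescFrom b xs d'

-- desc = [0] followed by the loop's appends
def pvDesc (arr : List Int) : List Nat :=
  0 :: (match arr with
        | [] => []
        | a :: xs => pvDescFrom a xs 0)

-- the `while stack` loop (length and m written out where Python binds them)
def pvLoop (desc : List Nat) (best : Int) (stack : List (Nat × Nat)) : Int :=
  match stack with
  | [] => best
  | (i, j) :: rest =>
    if j - i = 0 ∨ desc.getD (j - 1) 0 = desc.getD i 0 then
      pvLoop desc (if ((j - i : Nat) : Int) > best then ((j - i : Nat) : Int) else best) rest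
    else
      pvLoop desc best ((i, i + (j - i) / 2 + (j - i) % 2) :: (i + (j - i) / 2 + (j - i) % 2, j) :: rest)
termination_by (stack.map (fun p => 3 ^ (p.2 - p.1))).sum
decreasing_by
  · simp only [List.map_cons, List.sum_cons]
    have : 0 < 3 ^ (j - i) := Nat.pow_pos (by norm_num)
    omega
  · simp only [List.map_cons, List.sum_cons]
    rename_i hcond
    rw [not_or] at hcond
    obtain ⟨h0, hne⟩ := hcond
    have hji : i + 2 ≤ j := by
      by_contra hc
      have : j - 1 = i := by omega
      exact hne (by rw [this])
    have h1 : 3 ^ (i + (j - i) / 2 + (j - i) % 2 - i) ≤ 3 ^ (j - i - 1) :=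
      Nat.pow_le_pow_right (by norm_num) (by omega)
    have h2 : 3 ^ (j - (i + (j - i) / 2 + (j - i) % 2)) ≤ 3 ^ (j - i - 1) :=
      Nat.pow_le_pow_right (by norm_num) (by omega)
    have h3 : 3 ^ (j - i) = 3 ^ (j - i - 1) * 3 := by
      rw [← pow_succ]
      congr 1
      omega
    have h4 : 0 < 3 ^ (j - i - 1) := Nat.pow_pos (by norm_num)
    omega

def thanos_sort_alt (arr : List Int) : Int :=
  pvLoop (pvDesc arr) 0 [(0, arr.length)]

-- ===== PRECONDITION & SPEC =====
def Spec_thanos_sort (arr : List Int) (out : Int) : Prop := out = thanos_sort_alt arr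
instance (arr : List Int) (out : Int) : Decidable (Spec_thanos_sort arr out) := by unfold Spec_thanos_sort; infer_instance

-- ===== CLAIM (what is proved, stated in full; the proofs are below) =====
def Claim_equal_thanos_sort : Prop := ∀ (arr : List Int), Dom_thanos_sort arr → Spec_thanos_sort arr (thanos_sort arr)

-- ===== LEMMAS AND PROOFS =====

-- number of adjacent descents of a list
def pvNdesc : List Int → Nat
  | [] => 0
  | [_] => 0
  | a :: b :: xs => (if a > b then 1 else 0) + pvNdesc (b :: xs)

-- the sub-list arr[i:j]
def pvSliceN (arr : List Int) (i j : Nat) : List Int := (arr.take j).drop i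

theorem pvNdesc_chain : ∀ (l : List Int), pvNdesc l = 0 ↔ l.IsChain (· ≤ ·)
  | [] => by simp [pvNdesc]
  | [a] => by simp [pvNdesc]
  | a :: b :: xs => by
      rw [pvNdesc, List.isChain_cons_cons, ← pvNdesc_chain (b :: xs)]
      split_ifs with hab <;> omega

theorem pvNdesc_eq_zero_iff (l : List Int) : pvNdesc l = 0 ↔ l.Pairwise (· ≤ ·) := by
  rw [pvNdesc_chain, List.isChain_iff_pairwise]

theorem pv_sorted_iff (l : List Int) :
    l = PySem.List.sorted l (fun x => x) false ↔ l.Pairwise (· ≤ ·) := by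
  constructor
  · intro h
    have hp := PySem.List.sorted_pairwise (xs := l) (key := fun x => x)
    rw [← h] at hp
    simpa using hp
  · intro h
    symm
    apply PySem.List.sorted_eq_self_of_pairwise
    simpa using h

theorem pvDescFrom_getD : ∀ (xs : List Int) (a : Int) (d k : Nat), k < xs.length →
    (pvDescFrom a xs d).getD k 0 = d + pvNdesc (a :: xs.take (k + 1))
  | [], a, d, k, hk => by simp at hk
  | b :: ys, a, d, 0, hk => by
      simp only [pvDescFrom, List.getD_cons_zero, List.take_succ_cons, List.take_zero]
      simp [pvNdesc]
  | b :: ys, a, d, (k+1), hk => by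
      simp only [pvDescFrom, List.getD_cons_succ, List.take_succ_cons]
      rw [pvDescFrom_getD ys b (d + (if a > b then 1 else 0)) k (by simp at hk; omega)]
      rw [show pvNdesc (a :: b :: ys.take (k + 1)) = (if a > b then 1 else 0) + pvNdesc (b :: ys.take (k + 1)) from rfl]
      omega

theorem pvDesc_getD : ∀ (arr : List Int) (k : Nat), k < arr.length →
    (pvDesc arr).getD k 0 = pvNdesc (arr.take (k + 1))
  | [], k, hk => by simp at hk
  | a :: xs, 0, _ => by simp [pvDesc, pvNdesc]
  | a :: xs, (k+1), hk => by
      simp only [pvDesc, List.getD_cons_succ, List.take_succ_cons]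
      rw [pvDescFrom_getD xs a 0 k (by simp at hk; omega)]
      simp

theorem pvNdesc_split : ∀ (l : List Int) (i : Nat), i < l.length →
    pvNdesc l = pvNdesc (l.take (i + 1)) + pvNdesc (l.drop i)
  | [], i, hi => by simp at hi
  | a :: xs, 0, _ => by simp [pvNdesc]
  | a :: [], (k+1), hi => by simp at hi
  | a :: b :: ys, (k+1), hi => by
      have ih := pvNdesc_split (b :: ys) k (by simp at hi ⊢; omega)
      simp only [List.take_succ_cons, List.drop_succ_cons]
      simp only [List.take_succ_cons] at ih
      rw [show pvNdesc (a :: b :: ys) = (if a > b then 1 else 0) + pvNdesc (b :: ys) from rfl]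
      rw [show pvNdesc (a :: b :: ys.take k) = (if a > b then 1 else 0) + pvNdesc (b :: ys.take k) from rfl]
      omega

theorem pvSliceN_eq (arr : List Int) (i j : Nat) :
    pvSliceN arr i j = (arr.drop i).take (j - i) := by
  simp [pvSliceN, List.drop_take]

theorem pvSliceN_take (arr : List Int) (i j h : Nat) (hh : h ≤ j - i) :
    (pvSliceN arr i j).take h = pvSliceN arr i (i + h) := by
  rw [pvSliceN_eq, pvSliceN_eq, List.take_take]
  congr 1
  omega

theorem pvSliceN_drop (arr : List Int) (i j h : Nat) :
    (pvSliceN arr i j).drop h = pvSliceN arr (i + h) j := by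
  rw [pvSliceN_eq, pvSliceN_eq, List.drop_take, List.drop_drop]
  congr 1
  omega

theorem pvSliceN_length (arr : List Int) (i j : Nat) (hj : j ≤ arr.length) :
    (pvSliceN arr i j).length = j - i := by
  rw [pvSliceN_eq]
  simp only [List.length_take, List.length_drop]
  omega

theorem pvDesc_interval (arr : List Int) (i j : Nat) (hij : i < j) (hj : j ≤ arr.length) :
    (pvDesc arr).getD (j - 1) 0 = (pvDesc arr).getD i 0 + pvNdesc (pvSliceN arr i j) := by
  have h1 : (pvDesc arr).getD (j - 1) 0 = pvNdesc (arr.take j) := by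
    have := pvDesc_getD arr (j - 1) (by omega)
    rwa [show j - 1 + 1 = j by omega] at this
  have h2 : (pvDesc arr).getD i 0 = pvNdesc (arr.take (i + 1)) := pvDesc_getD arr i (by omega)
  have h3 := pvNdesc_split (arr.take j) i (by simp [List.length_take]; omega)
  rw [List.take_take, min_eq_left (by omega : i + 1 ≤ j)] at h3
  rw [h1, h2, h3]
  rfl

theorem pv_thanos_sorted (l : List Int) (h : l.Pairwise (· ≤ ·)) :
    thanos_sort l = (l.length : Int) := by
  rw [thanos_sort, dif_pos ((pv_sorted_iff l).mpr h)]

theorem pv_thanos_nonneg (l : List Int) : 0 ≤ thanos_sort l := by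
  induction l using thanos_sort.induct with
  | case1 arr h => rw [thanos_sort, dif_pos h]; positivity
  | case2 arr h hpar ih1 ih2 => rw [thanos_sort, dif_neg h, dif_pos hpar]; exact le_sup_of_le_left ih1
  | case3 arr h hpar ih1 ih2 => rw [thanos_sort, dif_neg h, dif_neg hpar]; exact le_sup_of_le_left ih1

theorem pv_thanos_split (arr : List Int) (i j : Nat) (_hij : i < j) (hj : j ≤ arr.length)
    (hns : ¬ (pvSliceN arr i j).Pairwise (· ≤ ·)) :
    thanos_sort (pvSliceN arr i j) =
      max (thanos_sort (pvSliceN arr i (i + ((j - i) / 2 + (j - i) % 2))))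
          (thanos_sort (pvSliceN arr (i + ((j - i) / 2 + (j - i) % 2)) j)) := by
  have hlen : (pvSliceN arr i j).length = j - i := pvSliceN_length arr i j hj
  have hne : ¬ pvSliceN arr i j = PySem.List.sorted (pvSliceN arr i j) (fun x => x) false :=
    fun hc => hns ((pv_sorted_iff _).mp hc)
  have hfd : PySem.Int.floordiv (((pvSliceN arr i j).length : Int)) 2 = (((j - i) / 2 : Nat) : Int) := by
    rw [hlen]; exact_mod_cast PySem.Int.floordiv_natCast (j - i) 2
  have hm : PySem.Int.mod (((pvSliceN arr i j).length : Int)) 2 = (((j - i) % 2 : Nat) : Int) := by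
    rw [hlen]; exact_mod_cast PySem.Int.mod_natCast (j - i) 2
  rw [thanos_sort, dif_neg hne]
  by_cases hpar : PySem.Int.mod (((pvSliceN arr i j).length : Int)) 2 = 0
  · rw [dif_pos hpar, hfd, PySem.List.slice_to_natCast, PySem.List.slice_from_natCast]
    have he : (j - i) % 2 = 0 := by
      rw [hm] at hpar
      exact_mod_cast hpar
    have hsp : (j - i) / 2 + (j - i) % 2 = (j - i) / 2 := by omega
    rw [pvSliceN_take arr i j ((j - i) / 2) (by omega), pvSliceN_drop, hsp]
  · rw [dif_neg hpar, hfd,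
        show (((j - i) / 2 : Nat) : Int) + 1 = (((j - i) / 2 + 1 : Nat) : Int) by push_cast; ring,
        PySem.List.slice_to_natCast, PySem.List.slice_from_natCast]
    have ho : (j - i) % 2 = 1 := by
      have : ((j - i) % 2 : Nat) ≠ 0 := by
        intro hz
        exact hpar (by rw [hm, hz]; simp)
      omega
    have hsp : (j - i) / 2 + (j - i) % 2 = (j - i) / 2 + 1 := by omega
    rw [pvSliceN_take arr i j ((j - i) / 2 + 1) (by omega), pvSliceN_drop, hsp]

theorem pvLoop_nil (desc : List Nat) (best : Int) : pvLoop desc best [] = best := by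
  rw [pvLoop]

theorem pvLoop_cons (desc : List Nat) (best : Int) (i j : Nat) (rest : List (Nat × Nat)) :
    pvLoop desc best ((i, j) :: rest) =
      if j - i = 0 ∨ desc.getD (j - 1) 0 = desc.getD i 0 then
        pvLoop desc (if ((j - i : Nat) : Int) > best then ((j - i : Nat) : Int) else best) rest
      else
        pvLoop desc best ((i, i + (j - i) / 2 + (j - i) % 2) :: (i + (j - i) / 2 + (j - i) % 2, j) :: rest) := by
  rw [pvLoop]

theorem pvLoop_spec (arr : List Int) : ∀ (best : Int) (stack : List (Nat × Nat)),
    (∀ p ∈ stack, p.1 ≤ p.2 ∧ p.2 ≤ arr.length) →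
    pvLoop (pvDesc arr) best stack =
      stack.foldl (fun b p => max b (thanos_sort (pvSliceN arr p.1 p.2))) best := by
  intro best stack
  induction best, stack using pvLoop.induct (desc := pvDesc arr) with
  | case1 best =>
      intro _
      simp [pvLoop_nil]
  | case2 best i j rest h ih =>
      intro hs
      simp only [dite_eq_ite] at ih
      have hbs := hs (i, j) (by simp)
      simp only at hbs
      rw [pvLoop_cons, if_pos h, List.foldl_cons]
      rw [ih (fun p hp => hs p (List.mem_cons_of_mem _ hp))]
      congr 1
      have hT : thanos_sort (pvSliceN arr i j) = ((j - i : Nat) : Int) := by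
        by_cases h0 : j - i = 0
        · have hnil : pvSliceN arr i j = [] := by rw [pvSliceN_eq, h0]; simp
          rw [hnil, pv_thanos_sorted [] (by simp), h0]
          simp
        · have hlt : i < j := by omega
          have heq := h.resolve_left h0
          have hint := pvDesc_interval arr i j hlt hbs.2
          have hz : pvNdesc (pvSliceN arr i j) = 0 := by omega
          rw [pv_thanos_sorted _ ((pvNdesc_eq_zero_iff _).mp hz), pvSliceN_length arr i j hbs.2]
      rw [hT, max_def]
      split_ifs <;> omega
  | case3 best i j rest h ih =>
      intro hs
      have hbs := hs (i, j) (by simp)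
      simp only at hbs
      have hcopy := h
      rw [not_or] at hcopy
      obtain ⟨h0, hne⟩ := hcopy
      have hlt : i < j := by omega
      have hint := pvDesc_interval arr i j hlt hbs.2
      have hns : ¬ (pvSliceN arr i j).Pairwise (· ≤ ·) := fun hp =>
        hne (by rw [hint, (pvNdesc_eq_zero_iff _).mpr hp]; omega)
      rw [pvLoop_cons, if_neg h]
      rw [ih (by
        intro p hp
        simp only [List.mem_cons] at hp
        rcases hp with rfl | rfl | hp
        · simp only
          omega
        · simp only
          omega
        · exact hs p (List.mem_cons_of_mem _ hp))]
      simp only [List.foldl_cons]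
      rw [pv_thanos_split arr i j hlt hbs.2 hns, ← max_assoc]
      simp only [Nat.add_assoc]

-- ===== VERDICT (by name: the statement is the Claim_ definition above) =====
theorem thanos_sort_spec : Claim_equal_thanos_sort := by
  intro arr _
  unfold Spec_thanos_sort thanos_sort_alt
  rw [pvLoop_spec arr 0 [(0, arr.length)] (by simp)]
  simp only [List.foldl_cons, List.foldl_nil]
  have hsl : pvSliceN arr 0 arr.length = arr := by
    simp [pvSliceN]
  rw [hsl]
  exact (max_eq_right (pv_thanos_nonneg arr)).symm
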